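-- pv_equiv track=rewrite | github.com/loserrain/UVa-1 | 706/lc.py | print_8
-- ===== SOURCE A (Python) =====
-- def init_grid(s):
--     grid = []
--     for i in range(2*s + 3):
--         grid.append([' '] * (s+2))
--
--     return grid
--
-- def print_8(s):
--     grid = init_grid(s)
--     for i in [0, s+1, -1]:
--         for j in range(1, s+1):
--             grid[i][j] = '-'
--
--     for i in range(1, s+1):
--         grid[i][0] = '|'
--         grid[i][-1] = '|'
--
--     for i in range(s+2, 2*s + 2):
--         grid[i][0] = '|'
--         grid[i][-1] = '|'
--
--     return grid
-- ===== SOURCE B (Python) =====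
-- def print_8(s):
--     w = s + 2
--     n = 2 * s + 3
--     bar = ['-' if 0 < j < w - 1 else ' ' for j in range(w)]
--     side = ['|' if j in (0, w - 1) else ' ' for j in range(w)]
--     bars = (0, s + 1, n - 1)
--     return [list(bar) if i in bars else list(side) for i in range(n)]
-- ===== Notes on version B (the rewrite author's own statement) =====
-- stated objective: idiomatic
-- what changed: B synthesizes each row directly from the row index in one comprehension pass (bar row vs side row, cell chosen by position), instead of A's allocate-a-space-grid-then-patch strategy with four separate mutation loops.
import Mathlib
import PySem

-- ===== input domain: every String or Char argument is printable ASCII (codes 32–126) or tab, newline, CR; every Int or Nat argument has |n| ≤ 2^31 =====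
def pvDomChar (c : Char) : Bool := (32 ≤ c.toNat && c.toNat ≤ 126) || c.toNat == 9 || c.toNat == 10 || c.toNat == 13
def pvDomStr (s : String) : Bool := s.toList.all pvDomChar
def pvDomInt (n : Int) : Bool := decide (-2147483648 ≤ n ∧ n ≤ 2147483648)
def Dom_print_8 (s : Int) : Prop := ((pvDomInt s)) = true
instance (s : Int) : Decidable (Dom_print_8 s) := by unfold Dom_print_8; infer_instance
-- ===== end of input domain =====

-- B builds each row directly from its row index (bar row or side row) in one
-- comprehension pass, instead of A's space-filled grid patched by four mutation
-- loops. A mutates only its own fresh grid; no argument is mutated.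

-- ===== PORT A =====
-- grid[i][j] = v  (rows are distinct fresh lists, so read-modify-write is exact;
-- indices are always in range in A's executed loops, so the total pySetD/pyGetD forms are exact)
def pvSetCell (g : List (List String)) (i j : Int) (v : String) : List (List String) :=
  PySem.List.pySetD g i (PySem.List.pySetD (PySem.List.pyGetD g i []) j v)

def init_grid (s : Int) : List (List String) :=
  (PySem.List.pyRange 0 (2*s + 3) 1).foldl
    (fun g _ => g ++ [List.replicate (s + 2).toNat " "]) []

def print_8 (s : Int) : List (List String) :=
  let grid := init_grid s
  let grid := ([0, s + 1, -1] : List Int).foldl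
    (fun g i => (PySem.List.pyRange 1 (s + 1) 1).foldl (fun g j => pvSetCell g i j "-") g) grid
  let grid := (PySem.List.pyRange 1 (s + 1) 1).foldl
    (fun g i => pvSetCell (pvSetCell g i 0 "|") i (-1) "|") grid
  let grid := (PySem.List.pyRange (s + 2) (2*s + 2) 1).foldl
    (fun g i => pvSetCell (pvSetCell g i 0 "|") i (-1) "|") grid
  grid

-- ===== PORT B =====
def print_8_alt (s : Int) : List (List String) :=
  let w := s + 2
  let n := 2*s + 3
  let bar := (PySem.List.pyRange 0 w 1).map (fun j => if 0 < j ∧ j < w - 1 then "-" else " ")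
  let side := (PySem.List.pyRange 0 w 1).map (fun j => if j = 0 ∨ j = w - 1 then "|" else " ")
  (PySem.List.pyRange 0 n 1).map (fun i => if i = 0 ∨ i = s + 1 ∨ i = n - 1 then bar else side)

-- ===== PRECONDITION & SPEC =====
def Spec_print_8 (s : Int) (out : List (List String)) : Prop := out = print_8_alt s
instance (s : Int) (out : List (List String)) : Decidable (Spec_print_8 s out) := by unfold Spec_print_8; infer_instance

-- ===== CLAIM (what is proved, stated in full; the proofs are below) =====
def Claim_equal_print_8 : Prop := ∀ (s : Int), Dom_print_8 s → Spec_print_8 s (print_8 s)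

-- ===== LEMMAS AND PROOFS =====

-- a grid viewed as a function of (row index, column index)
def pvMk (n m : Int) (f : Int → Int → String) : List (List String) :=
  (PySem.List.pyRange 0 n 1).map (fun i => (PySem.List.pyRange 0 m 1).map (f i))

-- reading index j (possibly negative, Python-style) of a range-comprehension list
lemma pvGetD_mapRange {α : Type} (m j j' : Int) (f : Int → α) (d : α)
    (h1 : -m ≤ j) (h2 : j < m) (hj : (if j < 0 then j + m else j) = j') :
    PySem.List.pyGetD ((PySem.List.pyRange 0 m 1).map f) j d = f j' := by
  have hlen : ((PySem.List.pyRange 0 m 1).map f).length = m.toNat := by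
    simp [PySem.List.length_pyRange_one]
  have hidx : PySem.List.pyIdx? ((PySem.List.pyRange 0 m 1).map f).length j = some j'.toNat := by
    rw [hlen]; unfold PySem.List.pyIdx?
    split_ifs with hp hq hr <;> [skip; omega; skip; omega]
    · congr 1; omega
    · congr 1; omega
  simp only [PySem.List.pyGetD, PySem.List.pyGet?, hidx, Option.bind]
  have hj' : j'.toNat < ((PySem.List.pyRange 0 m 1).map f).length := by rw [hlen]; omega
  rw [List.getElem?_eq_getElem hj']
  simp only [Option.getD_some, List.getElem_map, PySem.List.getElem_pyRange_one]
  congr 1; omega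

-- writing index j (possibly negative, Python-style) of a range-comprehension list
lemma pvSetD_mapRange {α : Type} (m j j' : Int) (f : Int → α) (v : α)
    (h1 : -m ≤ j) (h2 : j < m) (hj : (if j < 0 then j + m else j) = j') :
    PySem.List.pySetD ((PySem.List.pyRange 0 m 1).map f) j v
      = (PySem.List.pyRange 0 m 1).map (fun y => if y = j' then v else f y) := by
  have hlen : ((PySem.List.pyRange 0 m 1).map f).length = m.toNat := by
    simp [PySem.List.length_pyRange_one]
  have hidx : PySem.List.pyIdx? ((PySem.List.pyRange 0 m 1).map f).length j = some j'.toNat := by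
    rw [hlen]; unfold PySem.List.pyIdx?
    split_ifs with hp hq hr <;> [skip; omega; skip; omega]
    · congr 1; omega
    · congr 1; omega
  simp only [PySem.List.pySetD, PySem.List.pySet?, hidx, Option.map_some, Option.getD_some]
  apply List.ext_getElem
  · simp
  · intro k hk1 hk2
    simp only [List.getElem_set, List.getElem_map, PySem.List.getElem_pyRange_one]
    have hk : k < m.toNat := by simpa [hlen] using hk1
    by_cases hkj : j'.toNat = k
    · rw [if_pos hkj, if_pos (by omega)]
    · rw [if_neg hkj, if_neg (by omega)]

-- grid[i][j] = v on a pvMk grid updates the cell function at the resolved indices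
lemma pvSetCell_mk (n m i j i' j' : Int) (f : Int → Int → String) (v : String)
    (hi1 : -n ≤ i) (hi2 : i < n) (hj1 : -m ≤ j) (hj2 : j < m)
    (hi : (if i < 0 then i + n else i) = i') (hj : (if j < 0 then j + m else j) = j') :
    pvSetCell (pvMk n m f) i j v
      = pvMk n m (fun x y => if x = i' ∧ y = j' then v else f x y) := by
  unfold pvSetCell pvMk
  rw [pvGetD_mapRange n i i' (fun x => (PySem.List.pyRange 0 m 1).map (f x)) [] hi1 hi2 hi]
  rw [pvSetD_mapRange m j j' (f i') v hj1 hj2 hj]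
  rw [pvSetD_mapRange n i i' _ _ hi1 hi2 hi]
  apply List.map_congr_left
  intro x hx
  by_cases hxi : x = i'
  · rw [if_pos hxi]
    apply List.map_congr_left
    intro y hy
    by_cases hyj : y = j'
    · rw [if_pos hyj]; simp [hxi, hyj]
    · rw [if_neg hyj]; simp [hxi, hyj]
  · rw [if_neg hxi]
    apply List.map_congr_left
    intro y hy
    simp [hxi]

lemma pvMk_congr (n m : Int) (f g : Int → Int → String)
    (h : ∀ x y, f x y = g x y) : pvMk n m f = pvMk n m g := by
  unfold pvMk
  exact List.map_congr_left (fun x _ => List.map_congr_left (fun y _ => h x y))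

-- A's inner bar loop: for j in range(a, b): grid[i][j] = '-'
lemma pvBarLoop (n m i i' a b : Int) (f : Int → Int → String)
    (hi1 : -n ≤ i) (hi2 : i < n) (hi : (if i < 0 then i + n else i) = i')
    (ha : 0 ≤ a) (hb : b ≤ m) :
    (PySem.List.pyRange a b 1).foldl (fun g j => pvSetCell g i j "-") (pvMk n m f)
      = pvMk n m (fun x y => if x = i' ∧ a ≤ y ∧ y < b then "-" else f x y) := by
  by_cases hab : b ≤ a
  · rw [PySem.List.pyRange_one_eq_nil hab, List.foldl_nil]
    exact pvMk_congr _ _ _ _ (fun x y => by rw [if_neg (by omega)])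
  · rw [not_le] at hab
    have hk : ∃ k : Nat, (b - a).toNat = k := ⟨_, rfl⟩
    obtain ⟨k, hkeq⟩ := hk
    induction k generalizing a f with
    | zero => omega
    | succ k ih =>
      rw [PySem.List.pyRange_one_cons hab, List.foldl_cons]
      rw [pvSetCell_mk n m i a i' a f "-" hi1 hi2 (by omega) (by omega) hi (by rw [if_neg (by omega)])]
      by_cases hab2 : a + 1 < b
      · rw [ih (a + 1) _ (by omega) hab2 (by omega)]
        exact pvMk_congr _ _ _ _ (fun x y => by split_ifs <;> first | rfl | omega)
      · have : b = a + 1 := by omega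
        subst this
        rw [PySem.List.pyRange_one_eq_nil (by omega), List.foldl_nil]
        exact pvMk_congr _ _ _ _ (fun x y => by split_ifs <;> first | rfl | omega)

-- A's side loops: for i in range(a, b): grid[i][0] = '|'; grid[i][-1] = '|'
lemma pvSideLoop (n m a b : Int) (f : Int → Int → String)
    (ha : 0 ≤ a) (hb : b ≤ n) (hm : 1 ≤ m) :
    (PySem.List.pyRange a b 1).foldl
        (fun g i => pvSetCell (pvSetCell g i 0 "|") i (-1) "|") (pvMk n m f)
      = pvMk n m (fun x y => if a ≤ x ∧ x < b ∧ (y = 0 ∨ y = m - 1) then "|" else f x y) := by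
  by_cases hab : b ≤ a
  · rw [PySem.List.pyRange_one_eq_nil hab, List.foldl_nil]
    exact pvMk_congr _ _ _ _ (fun x y => by rw [if_neg (by omega)])
  · rw [not_le] at hab
    have hk : ∃ k : Nat, (b - a).toNat = k := ⟨_, rfl⟩
    obtain ⟨k, hkeq⟩ := hk
    induction k generalizing a f with
    | zero => omega
    | succ k ih =>
      rw [PySem.List.pyRange_one_cons hab, List.foldl_cons]
      rw [pvSetCell_mk n m a 0 a 0 f "|" (by omega) (by omega) (by omega) (by omega)
          (by rw [if_neg (by omega)]) (by rw [if_neg (by omega)])]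
      rw [pvSetCell_mk n m a (-1) a (m - 1) _ "|" (by omega) (by omega) (by omega) (by omega)
          (by rw [if_neg (by omega)]) (by rw [if_pos (by omega)]; ring)]
      by_cases hab2 : a + 1 < b
      · rw [ih (a + 1) _ (by omega) hab2 (by omega)]
        exact pvMk_congr _ _ _ _ (fun x y => by split_ifs <;> first | rfl | omega)
      · have : b = a + 1 := by omega
        subst this
        rw [PySem.List.pyRange_one_eq_nil (by omega), List.foldl_nil]
        exact pvMk_congr _ _ _ _ (fun x y => by split_ifs <;> first | rfl | omega)

lemma pvInit (s : Int) : init_grid s = pvMk (2*s + 3) (s + 2) (fun _ _ => " ") := by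
  unfold init_grid pvMk
  rw [PySem.List.foldl_append_singleton_eq_map]
  apply List.map_congr_left
  intro x hx
  rw [PySem.List.pyRange_one, List.map_map]
  simp only [Function.comp_def]
  rw [List.map_const']
  simp

lemma pvMain (s : Int) (hs : 0 ≤ s) : print_8 s = print_8_alt s := by
  have hA : print_8 s = pvMk (2*s + 3) (s + 2) (fun x y =>
      if s + 2 ≤ x ∧ x < 2*s + 2 ∧ (y = 0 ∨ y = s + 2 - 1) then "|"
      else if 1 ≤ x ∧ x < s + 1 ∧ (y = 0 ∨ y = s + 2 - 1) then "|"
      else if x = 2*s + 2 ∧ 1 ≤ y ∧ y < s + 1 then "-"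
      else if x = s + 1 ∧ 1 ≤ y ∧ y < s + 1 then "-"
      else if x = 0 ∧ 1 ≤ y ∧ y < s + 1 then "-"
      else " ") := by
    unfold print_8
    rw [pvInit]
    simp only [List.foldl_cons, List.foldl_nil]
    rw [pvBarLoop (2*s+3) (s+2) 0 0 1 (s+1) _ (by omega) (by omega)
        (by rw [if_neg (by omega)]) (by omega) (by omega)]
    rw [pvBarLoop (2*s+3) (s+2) (s+1) (s+1) 1 (s+1) _ (by omega) (by omega)
        (by rw [if_neg (by omega)]) (by omega) (by omega)]
    rw [pvBarLoop (2*s+3) (s+2) (-1) (2*s+2) 1 (s+1) _ (by omega) (by omega)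
        (by rw [if_pos (by omega)]; ring) (by omega) (by omega)]
    rw [pvSideLoop (2*s+3) (s+2) 1 (s+1) _ (by omega) (by omega) (by omega)]
    rw [pvSideLoop (2*s+3) (s+2) (s+2) (2*s+2) _ (by omega) (by omega) (by omega)]
  rw [hA]
  unfold print_8_alt pvMk
  apply List.map_congr_left
  intro x hx
  rw [PySem.List.mem_pyRange_one] at hx
  by_cases hbar : x = 0 ∨ x = s + 1 ∨ x = 2*s + 3 - 1
  · rw [if_pos hbar]
    apply List.map_congr_left
    intro y hy
    rw [PySem.List.mem_pyRange_one] at hy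
    beta_reduce
    split_ifs <;> first | rfl | omega
  · rw [if_neg hbar]
    apply List.map_congr_left
    intro y hy
    rw [PySem.List.mem_pyRange_one] at hy
    beta_reduce
    split_ifs <;> first | rfl | omega

lemma pvNeg2 (s : Int) (hs : s ≤ -2) : print_8 s = print_8_alt s := by
  have h1 : PySem.List.pyRange 0 (2*s + 3) 1 = [] := PySem.List.pyRange_one_eq_nil (by omega)
  have h2 : PySem.List.pyRange 1 (s + 1) 1 = [] := PySem.List.pyRange_one_eq_nil (by omega)
  have h3 : PySem.List.pyRange (s + 2) (2*s + 2) 1 = [] := PySem.List.pyRange_one_eq_nil (by omega)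
  unfold print_8 init_grid print_8_alt
  rw [h1, h2, h3]
  simp [h1]

lemma pvNegOne : print_8 (-1) = print_8_alt (-1) := by decide

-- ===== VERDICT (by name: the statement is the Claim_ definition above) =====
theorem print_8_spec : Claim_equal_print_8 := by
  intro s _
  unfold Spec_print_8
  by_cases h0 : 0 ≤ s
  · exact pvMain s h0
  · by_cases h1 : s = -1
    · subst h1; exact pvNegOne
    · exact pvNeg2 s (by omega)
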